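-- pv_equiv track=rewrite | github.com/LimbuSunil2058/llmcommit | src/llmcommit/simple_client.py | _get_primary_file
-- ===== SOURCE A (Python) =====
-- def _get_primary_file(files: list) -> str:
--     """Get the most important file from the list."""
--     if not files:
--         return "files"
--
--     # Prioritize certain file types
--     priority_extensions = ['.py', '.js', '.ts', '.jsx', '.tsx', '.java', '.cpp', '.c']
--
--     for ext in priority_extensions:
--         for file in files:
--             if file.endswith(ext):
--                 return file
--
--     # Return first file if no priority match
--     return files[0]
-- ===== SOURCE B (Python) =====
-- def _get_primary_file(files: list) -> str:
--     """Get the most important file from the list."""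
--     if not files:
--         return "files"
--
--     priority_extensions = ['.py', '.js', '.ts', '.jsx', '.tsx', '.java', '.cpp', '.c']
--
--     def rank(file):
--         for i, ext in enumerate(priority_extensions):
--             if file.endswith(ext):
--                 return i
--         return len(priority_extensions)
--
--     # min is stable: on equal rank the earliest file wins, and when nothing
--     # matches every rank is equal so files[0] is returned.
--     return min(files, key=rank)
-- ===== Notes on version B (the rewrite author's own statement) =====
-- stated objective: idiomatic
-- what changed: The nested extension-then-file scan with early return is replaced by a per-file rank function (index of the first matching priority extension, or the list length) and a single stable argmin via min(files, key=rank), which also yields files[0] when nothing matches.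
import Mathlib
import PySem

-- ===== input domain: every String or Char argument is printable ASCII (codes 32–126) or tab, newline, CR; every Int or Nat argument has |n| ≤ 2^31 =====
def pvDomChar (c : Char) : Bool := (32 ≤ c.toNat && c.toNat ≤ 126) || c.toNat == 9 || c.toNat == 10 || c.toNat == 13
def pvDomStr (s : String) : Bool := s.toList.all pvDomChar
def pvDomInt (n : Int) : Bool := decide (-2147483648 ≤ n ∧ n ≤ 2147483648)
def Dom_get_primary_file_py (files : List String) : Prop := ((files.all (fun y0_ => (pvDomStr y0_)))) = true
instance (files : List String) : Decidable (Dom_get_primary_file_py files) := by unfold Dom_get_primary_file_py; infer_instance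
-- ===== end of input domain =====

-- B replaces A's nested extension-then-file scan by a per-file rank key plus a stable argmin (idiomatic; same cost).


-- ===== PORT A =====
def pvExtsA : List String := [".py", ".js", ".ts", ".jsx", ".tsx", ".java", ".cpp", ".c"]

-- the outer 'for ext in priority_extensions' loop; the inner 'for file in files' loop is the first-match scan List.find?
def pvLoopA (files : List String) : List String → Option String
  | [] => none
  | e :: rest =>
    match List.find? (fun f => PySem.Str.endswith f e) files with
    | some f => some f
    | none => pvLoopA files rest

def get_primary_file_py (files : List String) : String :=
  match files with
  | [] => "files"
  | f0 :: _ =>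
    match pvLoopA files pvExtsA with
    | some f => f
    | none => f0

-- ===== PORT B =====
-- rank(file): index of the first priority extension the file ends with, or the list length if none
def pvRank (file : String) : List String → Nat
  | [] => 0
  | e :: rest => if PySem.Str.endswith file e then 0 else 1 + pvRank file rest

def get_primary_file_py_alt (files : List String) : String :=
  if files.isEmpty then "files"
  else (PySem.List.min? files (fun f => pvRank f pvExtsA)).getD "files"

-- ===== PRECONDITION & SPEC =====
def Spec_get_primary_file_py (files : List String) (out : String) : Prop := out = get_primary_file_py_alt files
instance (files : List String) (out : String) : Decidable (Spec_get_primary_file_py files out) := by unfold Spec_get_primary_file_py; infer_instance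

-- ===== CLAIM (what is proved, stated in full; the proofs are below) =====
def Claim_equal_get_primary_file_py : Prop := ∀ (files : List String), Dom_get_primary_file_py files → Spec_get_primary_file_py files (get_primary_file_py files)

-- ===== LEMMAS AND PROOFS =====

-- the accumulator step of PySem.List.min?
def pvStep (key : String → Nat) (acc : Option String) (x : String) : Option String :=
  match acc with
  | none => some x
  | some m => if key x < key m then some x else some m

theorem pvMin?_eq_foldl (key : String → Nat) (xs : List String) :
    PySem.List.min? xs key = xs.foldl (pvStep key) none := by
  simp only [PySem.List.min?]
  congr 1
  funext acc x
  cases acc <;> rfl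

-- once the accumulator holds a minimal element it never changes
theorem pvFoldl_keep (key : String → Nat) (fs : List String) (m : String)
    (h : ∀ x ∈ fs, ¬ key x < key m) :
    fs.foldl (pvStep key) (some m) = some m := by
  induction fs with
  | nil => rfl
  | cons x t ih =>
    have hx : ¬ key x < key m := h x (by simp)
    simp only [List.foldl_cons, pvStep, if_neg hx]
    exact ih (fun y hy => h y (by simp [hy]))

-- the first element of rank 0 is the argmin
theorem pvMin?_first_zero (key : String → Nat) (pre : List String) (f : String) (suf : List String)
    (hf : key f = 0) (hpre : ∀ x ∈ pre, key x ≠ 0) :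
    PySem.List.min? (pre ++ f :: suf) key = some f := by
  rw [pvMin?_eq_foldl, List.foldl_append]
  have hkeep : suf.foldl (pvStep key) (some f) = some f :=
    pvFoldl_keep key suf f (by intro x _; omega)
  have h0 : pre.foldl (pvStep key) none = PySem.List.min? pre key := (pvMin?_eq_foldl key pre).symm
  rw [h0]
  cases hmin : PySem.List.min? pre key with
  | none =>
    simp only [List.foldl_cons, pvStep]
    exact hkeep
  | some m =>
    have hmem : m ∈ pre := PySem.List.min?_mem hmin
    have hlt : key f < key m := by
      have := hpre m hmem; omega
    simp only [List.foldl_cons, pvStep, if_pos hlt]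
    exact hkeep
-- shifting the key by +1 on every element of the list does not change the argmin
theorem pvFoldl_shift (key1 key2 : String → Nat) (fs : List String) (acc : Option String)
    (hfs : ∀ x ∈ fs, key1 x = 1 + key2 x)
    (hacc : ∀ m, acc = some m → key1 m = 1 + key2 m) :
    fs.foldl (pvStep key1) acc = fs.foldl (pvStep key2) acc := by
  induction fs generalizing acc with
  | nil => rfl
  | cons x t ih =>
    have hx : key1 x = 1 + key2 x := hfs x (by simp)
    have ht : ∀ y ∈ t, key1 y = 1 + key2 y := fun y hy => hfs y (by simp [hy])
    cases acc with
    | none =>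
      simp only [List.foldl_cons, pvStep]
      exact ih (some x) ht (by intro m hm; cases hm; exact hx)
    | some m =>
      have hm : key1 m = 1 + key2 m := hacc m rfl
      have hcond : (key1 x < key1 m) = (key2 x < key2 m) := by
        rw [hx, hm]; simp
      simp only [List.foldl_cons, pvStep, hcond]
      by_cases h : key2 x < key2 m
      · simp only [if_pos h]
        exact ih (some x) ht (by intro m' hm'; cases hm'; exact hx)
      · simp only [if_neg h]
        exact ih (some m) ht (by intro m' hm'; cases hm'; exact hm)

theorem pvMin?_shift (e : String) (key : String → Nat) (fs : List String)
    (h : ∀ f ∈ fs, PySem.Str.endswith f e = false) :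
    PySem.List.min? fs (fun f => if PySem.Str.endswith f e then 0 else 1 + key f)
      = PySem.List.min? fs key := by
  rw [pvMin?_eq_foldl, pvMin?_eq_foldl]
  apply pvFoldl_shift
  · intro x hx
    simp only [h x hx, Bool.false_eq_true, if_false]
  · intro m hm; cases hm

-- main invariant: on a nonempty list, the argmin of the rank equals A's nested scan (with head fallback)
theorem pvMain (es : List String) (f0 : String) (fs : List String) :
    PySem.List.min? (f0 :: fs) (fun f => pvRank f es)
      = some (match pvLoopA (f0 :: fs) es with | some f => f | none => f0) := by
  induction es with
  | nil =>
    have hkey : (fun f => pvRank f ([] : List String)) = fun _ => 0 := by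
      funext f; simp [pvRank]
    rw [hkey, pvMin?_eq_foldl]
    simp only [pvLoopA, List.foldl_cons]
    exact pvFoldl_keep (fun _ => 0) fs f0 (by intro x _; simp)
  | cons e rest ih =>
    cases hfind : List.find? (fun f => PySem.Str.endswith f e) (f0 :: fs) with
    | some fstar =>
      obtain ⟨hp, pre, suf, heq, hpre⟩ := List.find?_eq_some_iff_append.mp hfind
      have : PySem.List.min? (f0 :: fs) (fun f => pvRank f (e :: rest)) = some fstar := by
        rw [heq]
        apply pvMin?_first_zero
        · simp only [pvRank, hp, if_true]
        · intro x hx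
          have hxp : PySem.Str.endswith x e = false := by
            have := hpre x hx; simp only [Bool.not_eq_true'] at this; exact this
          simp only [pvRank, hxp, Bool.false_eq_true, if_false]
          omega
      rw [this]
      simp only [pvLoopA, hfind]
    | none =>
      have hall : ∀ f ∈ f0 :: fs, PySem.Str.endswith f e = false := by
        intro f hf
        have := List.find?_eq_none.mp hfind f hf
        simpa using this
      have hshift := pvMin?_shift e (fun f => pvRank f rest) (f0 :: fs) hall
      simp only [pvLoopA, hfind]
      calc PySem.List.min? (f0 :: fs) (fun f => pvRank f (e :: rest))
          = PySem.List.min? (f0 :: fs) (fun f => pvRank f rest) := by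
            simpa [pvRank] using hshift
        _ = some (match pvLoopA (f0 :: fs) rest with | some f => f | none => f0) := ih

-- ===== VERDICT (by name: the statement is the Claim_ definition above) =====
theorem get_primary_file_py_spec : Claim_equal_get_primary_file_py := by
  intro files _
  unfold Spec_get_primary_file_py get_primary_file_py get_primary_file_py_alt
  cases files with
  | nil => rfl
  | cons f0 fs =>
    have h := pvMain pvExtsA f0 fs
    simp only [List.isEmpty_cons, if_neg Bool.false_ne_true, h, Option.getD_some]
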